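-- pv_equiv track=rewrite | github.com/vinchinzu/euler | python/348.py | count_representations
-- ===== SOURCE A (Python) =====
-- import math
--
-- def count_representations(n: int) -> int:
--     """Count ways to express n as a^2 + b^3 where a, b > 1.
--
--     Iterate b from 2 to cbrt(n), compute remainder = n - b^3,
--     check if remainder is a perfect square > 1.
--     """
--     count = 0
--     b = 2
--     while b ** 3 < n:
--         b_cubed = b ** 3
--         remainder = n - b_cubed
--         if remainder > 1:
--             a = int(math.isqrt(remainder))
--             if a > 1 and a * a == remainder:
--                 count += 1
--         b += 1
--     return count
-- ===== SOURCE B (Python) =====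
-- def count_representations(n: int) -> int:
--     """Count ways to express n as a^2 + b^3 where a, b > 1.
--
--     Precompute the set of cubes b^3 (b >= 2, b^3 <= n - 4), then scan
--     a from 2 while a*a <= n - 8 and count exact set hits of n - a*a.
--     """
--     cubes = set()
--     b = 2
--     while b ** 3 <= n - 4:
--         cubes.add(b ** 3)
--         b += 1
--     count = 0
--     a = 2
--     while a * a <= n - 8:
--         if n - a * a in cubes:
--             count += 1
--         a += 1
--     return count
-- ===== Notes on version B (the rewrite author's own statement) =====
-- stated objective: alternative
-- what changed: B precomputes the set of admissible cubes and scans a from 2 upward testing n - a*a for set membership, instead of A's loop over b with an isqrt perfect-square test.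
import Mathlib
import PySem

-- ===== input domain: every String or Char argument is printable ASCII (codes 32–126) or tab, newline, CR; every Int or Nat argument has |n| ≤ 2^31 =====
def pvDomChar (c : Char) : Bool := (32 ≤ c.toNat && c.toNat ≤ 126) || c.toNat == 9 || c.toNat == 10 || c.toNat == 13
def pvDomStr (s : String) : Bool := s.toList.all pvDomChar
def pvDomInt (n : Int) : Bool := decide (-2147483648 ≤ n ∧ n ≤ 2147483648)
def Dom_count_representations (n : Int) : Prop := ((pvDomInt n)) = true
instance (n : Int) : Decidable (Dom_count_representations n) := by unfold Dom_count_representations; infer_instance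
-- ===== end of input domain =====

-- B replaces A's cube loop + isqrt perfect-square test by a precomputed cube set scanned over squares (alternative algorithm, not faster).


-- (b+1)^3 > b^3, used for termination of the loops
theorem pvCubeSucc (b : Int) : b ^ 3 < (b + 1) ^ 3 := by nlinarith [sq_nonneg (2 * b + 1)]

-- ===== PORT A =====
-- math.isqrt on a nonnegative int (A only calls it with remainder > 1)
def pyIsqrt (m : Int) : Int := (Nat.sqrt m.toNat : Int)

-- the 'while b ** 3 < n' loop of A, carrying (count, b)
def loopA (n b count : Int) : Int :=
  if _h : b ^ 3 < n then
    let b_cubed := b ^ 3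
    let remainder := n - b_cubed
    let count' :=
      if 1 < remainder then
        let a := pyIsqrt remainder
        if 1 < a ∧ a * a = remainder then count + 1 else count
      else count
    loopA n (b + 1) count'
  else count
termination_by (n - b ^ 3).toNat
decreasing_by have := pvCubeSucc b; omega

def count_representations (n : Int) : Int := loopA n 2 0

-- ===== PORT B =====
-- first loop of B: add b ** 3 to the set while b ** 3 <= n - 4
def loopB1 (n b : Int) (cubes : PySem.Set Int) : PySem.Set Int :=
  if _h : b ^ 3 ≤ n - 4 then
    loopB1 n (b + 1) (PySem.Set.add cubes (b ^ 3))
  else cubes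
termination_by (n - 3 - b ^ 3).toNat
decreasing_by have := pvCubeSucc b; omega

-- second loop of B: count a with a * a <= n - 8 and n - a * a in cubes
def loopB2 (n a count : Int) (cubes : PySem.Set Int) : Int :=
  if _h : a * a ≤ n - 8 then
    loopB2 n (a + 1) (if PySem.Set.contains cubes (n - a * a) then count + 1 else count) cubes
  else count
termination_by (n - 7 - a).toNat
decreasing_by have : 4 * (a * a - a) ≥ -1 := by nlinarith [sq_nonneg (2 * a - 1)]
              omega

def count_representations_alt (n : Int) : Int :=
  loopB2 n 2 0 (loopB1 n 2 PySem.Set.empty)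

-- ===== PRECONDITION & SPEC =====
def Spec_count_representations (n : Int) (out : Int) : Prop := out = count_representations_alt n
instance (n : Int) (out : Int) : Decidable (Spec_count_representations n out) := by unfold Spec_count_representations; infer_instance

-- ===== CLAIM (what is proved, stated in full; the proofs are below) =====
def Claim_equal_count_representations : Prop := ∀ (n : Int), Dom_count_representations n → Spec_count_representations n (count_representations n)

-- ===== LEMMAS AND PROOFS =====

-- b-side predicate: n - b^3 is a perfect square with root ≥ 2 (root bounded by n, hence decidable)
abbrev goodB (n b : Int) : Prop := ∃ a ∈ Finset.Icc (2 : Int) n, a * a = n - b ^ 3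

-- a-side predicate: n - a*a is a cube with root ≥ 2
abbrev goodA (n a : Int) : Prop := ∃ b ∈ Finset.Icc (2 : Int) n, b ^ 3 = n - a * a

theorem cube_mono {b c : Int} (h : b ≤ c) : b ^ 3 ≤ c ^ 3 := by
  nlinarith [sq_nonneg (b + c), sq_nonneg (b - c), sq_nonneg b, sq_nonneg c]

theorem cube_strict_mono {b c : Int} (h : b < c) : b ^ 3 < c ^ 3 := by
  nlinarith [sq_nonneg (b + c), sq_nonneg (b - c), sq_nonneg b, sq_nonneg c]

theorem cube_ge_8 {b : Int} (h : 2 ≤ b) : 8 ≤ b ^ 3 := by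
  have := cube_mono h; norm_num at this; linarith

theorem cube_ge_self {b : Int} (h : 2 ≤ b) : b ≤ b ^ 3 := by
  have h2 : 4 ≤ b * b := by nlinarith
  nlinarith

theorem sq_ge_self (a : Int) : a ≤ a * a := by nlinarith [sq_nonneg (2 * a - 1)]

theorem goodB_cube_le {n b : Int} (h : goodB n b) : b ^ 3 ≤ n - 4 := by
  obtain ⟨a, haI, he⟩ := h
  rw [Finset.mem_Icc] at haI
  nlinarith

theorem goodA_sq_le {n a : Int} (hg : goodA n a) : a * a ≤ n - 8 := by
  obtain ⟨b, hbI, he⟩ := hg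
  rw [Finset.mem_Icc] at hbI
  have := cube_ge_8 hbI.1
  linarith

theorem pyIsqrt_sq {a : Int} (h : 0 ≤ a) : pyIsqrt (a * a) = a := by
  have h2 : a * a = ((a.toNat * a.toNat : ℕ) : ℤ) := by
    push_cast
    rw [Int.toNat_of_nonneg h]
  unfold pyIsqrt
  rw [h2, Int.toNat_natCast,
    show a.toNat * a.toNat = a.toNat ^ 2 by ring, Nat.sqrt_eq']
  omega

theorem icc_int_insert {b n : Int} (h : b ≤ n) :
    Finset.Icc b n = insert b (Finset.Icc (b + 1) n) := by
  ext x; simp only [Finset.mem_Icc, Finset.mem_insert]; omega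

theorem loopA_char (n : Int) : ∀ b count : Int, 2 ≤ b →
    loopA n b count = count + (((Finset.Icc b n).filter (fun b' => goodB n b')).card : Int) := by
  intro b count hb
  induction b, count using loopA.induct n with
  | case1 b count h b_cubed remainder count' ih =>
    have hb3 : b ^ 3 < n := h
    have hbn : b ≤ n := le_trans (cube_ge_self hb) (le_of_lt hb3)
    rw [loopA]
    simp only [dif_pos h]
    change loopA n (b + 1) count' = _
    rw [ih (by omega)]
    have hstep : count' = count + (if goodB n b then 1 else 0) := by
      by_cases hg : goodB n b
      · obtain ⟨a, haI, hae⟩ := hg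
        rw [Finset.mem_Icc] at haI
        have hr : (1:Int) < n - b ^ 3 := by nlinarith [haI.1]
        have hsq : pyIsqrt (n - b ^ 3) = a := by
          rw [← hae]; exact pyIsqrt_sq (by omega)
        have hgood : goodB n b := ⟨a, Finset.mem_Icc.mpr haI, hae⟩
        rw [if_pos hgood]
        simp only [count', remainder, b_cubed, hsq]
        rw [dif_pos hr, dif_pos (show 1 < a ∧ a * a = n - b ^ 3 from ⟨by omega, hae⟩)]
      · simp only [count', remainder, b_cubed, if_neg hg]
        split_ifs with h1 h2
        · exfalso
          apply hg
          refine ⟨pyIsqrt (n - b ^ 3), Finset.mem_Icc.mpr ⟨by omega, ?_⟩, h2.2⟩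
          have := sq_ge_self (pyIsqrt (n - b ^ 3))
          have h8 : 8 ≤ b ^ 3 := cube_ge_8 hb
          linarith [this, h2.2, h8]
        · omega
        · omega
    rw [hstep, icc_int_insert hbn, Finset.filter_insert]
    by_cases hg : goodB n b
    · rw [if_pos hg, if_pos hg, Finset.card_insert_of_notMem]
      · push_cast; ring
      · intro hmem
        have := (Finset.mem_filter.mp hmem).1
        rw [Finset.mem_Icc] at this
        omega
    · rw [if_neg hg, if_neg hg]; ring
  | case2 b count h =>
    rw [loopA]
    simp only [dif_neg h]
    have hemp : (Finset.Icc b n).filter (fun b' => goodB n b') = ∅ := by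
      apply Finset.filter_eq_empty_iff.mpr
      intro b' hb'
      rw [Finset.mem_Icc] at hb'
      intro hg
      have h1 : b' ^ 3 ≤ n - 4 := goodB_cube_le hg
      have h2 : b ^ 3 ≤ b' ^ 3 := cube_mono hb'.1
      omega
    rw [hemp]; simp

theorem mem_loopB1 (n : Int) : ∀ (b : Int) (s : PySem.Set Int) (x : Int),
    x ∈ loopB1 n b s ↔ x ∈ s ∨ ∃ c : Int, b ≤ c ∧ c ^ 3 ≤ n - 4 ∧ x = c ^ 3 := by
  intro b s x
  induction b, s using loopB1.induct n with
  | case1 b s h ih =>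
    rw [loopB1]
    simp only [dif_pos h]
    rw [ih, PySem.Set.mem_add]
    constructor
    · rintro ((hs | he) | ⟨c, hc1, hc2, hc3⟩)
      · exact Or.inl hs
      · exact Or.inr ⟨b, le_refl b, h, he⟩
      · exact Or.inr ⟨c, by omega, hc2, hc3⟩
    · rintro (hs | ⟨c, hc1, hc2, hc3⟩)
      · exact Or.inl (Or.inl hs)
      · by_cases hcb : c = b
        · exact Or.inl (Or.inr (by rw [hc3, hcb]))
        · exact Or.inr ⟨c, by omega, hc2, hc3⟩
  | case2 b s h =>
    rw [loopB1]
    simp only [dif_neg h]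
    constructor
    · exact Or.inl
    · rintro (hs | ⟨c, hc1, hc2, hc3⟩)
      · exact hs
      · have := cube_mono hc1; omega

theorem mem_cubes (n x : Int) :
    x ∈ loopB1 n 2 PySem.Set.empty ↔ ∃ c : Int, 2 ≤ c ∧ c ^ 3 ≤ n - 4 ∧ x = c ^ 3 := by
  rw [mem_loopB1]
  simp [PySem.Set.empty]

theorem loopB2_char (n : Int) (cubes : PySem.Set Int)
    (hc : ∀ x : Int, x ∈ cubes ↔ ∃ c : Int, 2 ≤ c ∧ c ^ 3 ≤ n - 4 ∧ x = c ^ 3) :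
    ∀ (k : ℕ) (a count : Int), (n - 7 - a).toNat = k → 2 ≤ a →
    loopB2 n a count cubes = count + (((Finset.Icc a n).filter (fun a' => goodA n a')).card : Int) := by
  intro k
  induction k using Nat.strong_induction_on with
  | _ k ih =>
    intro a count hk ha
    have haa : a ≤ a * a := sq_ge_self a
    rw [loopB2]
    split_ifs with h hcon
    · have h1 : a ≤ n - 8 := le_trans haa h
      have han : a ≤ n := by omega
      have hlt : (n - 7 - (a + 1)).toNat < k := by omega
      have hg : goodA n a := by
        rw [PySem.Set.contains_iff, hc] at hcon
        obtain ⟨c, hc1, hc2, hc3⟩ := hcon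
        have hcn : c ≤ n := by have := cube_ge_self hc1; omega
        exact ⟨c, Finset.mem_Icc.mpr ⟨hc1, hcn⟩, hc3.symm⟩
      rw [ih _ hlt (a + 1) _ rfl (by omega), icc_int_insert han, Finset.filter_insert,
        if_pos hg, Finset.card_insert_of_notMem]
      · push_cast; ring
      · intro hmem'
        have := (Finset.mem_filter.mp hmem').1
        rw [Finset.mem_Icc] at this
        omega
    · have h1 : a ≤ n - 8 := le_trans haa h
      have han : a ≤ n := by omega
      have hlt : (n - 7 - (a + 1)).toNat < k := by omega
      have hg : ¬ goodA n a := by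
        intro hg
        obtain ⟨c, hcI, hce⟩ := hg
        rw [Finset.mem_Icc] at hcI
        apply hcon
        rw [PySem.Set.contains_iff, hc]
        have h4 : 4 ≤ a * a := by nlinarith
        exact ⟨c, hcI.1, by linarith, hce.symm⟩
      rw [ih _ hlt (a + 1) _ rfl (by omega), icc_int_insert han, Finset.filter_insert, if_neg hg]
    · have hemp : (Finset.Icc a n).filter (fun a' => goodA n a') = ∅ := by
        apply Finset.filter_eq_empty_iff.mpr
        intro a' ha'
        rw [Finset.mem_Icc] at ha'
        intro hg
        have hh1 : a' * a' ≤ n - 8 := goodA_sq_le hg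
        have hh2 : a * a ≤ a' * a' := mul_le_mul ha'.1 ha'.1 (by omega) (by omega)
        omega
      rw [hemp]; simp

-- both counts equal the number of representation pairs (a, b)
theorem card_goodB_goodA (n : Int) :
    ((Finset.Icc (2 : Int) n).filter (fun b => goodB n b)).card =
      ((Finset.Icc (2 : Int) n).filter (fun a => goodA n a)).card := by
  have hB : ((Finset.Icc (2 : Int) n ×ˢ Finset.Icc (2 : Int) n).filter
      (fun p => p.1 * p.1 + p.2 ^ 3 = n)).card =
      ((Finset.Icc (2 : Int) n).filter (fun b => goodB n b)).card := by
    apply Finset.card_bij (fun p _ => p.2)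
    · intro p hp
      rw [Finset.mem_filter, Finset.mem_product] at hp
      obtain ⟨⟨h1, h2⟩, he⟩ := hp
      rw [Finset.mem_filter]
      exact ⟨h2, ⟨p.1, h1, by linarith⟩⟩
    · intro p hp q hq hpq
      rw [Finset.mem_filter, Finset.mem_product] at hp hq
      obtain ⟨⟨hp1, _⟩, hpe⟩ := hp
      obtain ⟨⟨hq1, _⟩, hqe⟩ := hq
      rw [Finset.mem_Icc] at hp1 hq1
      have hsq : p.1 * p.1 = q.1 * q.1 := by rw [hpq] at hpe; linarith
      have : p.1 = q.1 := by nlinarith [hp1.1, hq1.1]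
      exact Prod.ext this hpq
    · intro b hb
      rw [Finset.mem_filter] at hb
      obtain ⟨hbI, a, haI, hae⟩ := hb
      refine ⟨(a, b), ?_, rfl⟩
      rw [Finset.mem_filter, Finset.mem_product]
      exact ⟨⟨haI, hbI⟩, by linarith⟩
  have hA : ((Finset.Icc (2 : Int) n ×ˢ Finset.Icc (2 : Int) n).filter
      (fun p => p.1 * p.1 + p.2 ^ 3 = n)).card =
      ((Finset.Icc (2 : Int) n).filter (fun a => goodA n a)).card := by
    apply Finset.card_bij (fun p _ => p.1)
    · intro p hp
      rw [Finset.mem_filter, Finset.mem_product] at hp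
      obtain ⟨⟨h1, h2⟩, he⟩ := hp
      rw [Finset.mem_filter]
      exact ⟨h1, ⟨p.2, h2, by linarith⟩⟩
    · intro p hp q hq hpq
      rw [Finset.mem_filter, Finset.mem_product] at hp hq
      obtain ⟨⟨_, hp2⟩, hpe⟩ := hp
      obtain ⟨⟨_, hq2⟩, hqe⟩ := hq
      have hcu : p.2 ^ 3 = q.2 ^ 3 := by rw [hpq] at hpe; linarith
      have : p.2 = q.2 := by
        rcases lt_trichotomy p.2 q.2 with hlt | heq | hgt
        · exact absurd hcu (ne_of_lt (cube_strict_mono hlt))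
        · exact heq
        · exact absurd hcu.symm (ne_of_lt (cube_strict_mono hgt))
      exact Prod.ext hpq this
    · intro a ha
      rw [Finset.mem_filter] at ha
      obtain ⟨haI, b, hbI, hbe⟩ := ha
      refine ⟨(a, b), ?_, rfl⟩
      rw [Finset.mem_filter, Finset.mem_product]
      exact ⟨⟨haI, hbI⟩, by linarith⟩
  rw [← hB, hA]

-- ===== VERDICT (by name: the statement is the Claim_ definition above) =====
theorem count_representations_spec : Claim_equal_count_representations := by
  intro n _
  unfold Spec_count_representations count_representations count_representations_alt
  rw [loopA_char n 2 0 (by norm_num),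
    loopB2_char n (loopB1 n 2 PySem.Set.empty) (mem_cubes n) (n - 7 - 2).toNat 2 0 rfl (by norm_num),
    card_goodB_goodA]
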